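-- pv_equiv track=rewrite | github.com/mlynckat/mech-interp--style-in-transformer-activations | backend/src/steering/explore_original_vs_generated_texts.py | count_entity_tokens
-- ===== SOURCE A (Python) =====
-- from typing import Iterable, List, Optional, Sequence, Tuple
--
-- def count_entity_tokens(
--     tokens_with_spans: Sequence[Tuple[str, int, int]],
--     entities: Sequence[dict],
-- ) -> int:
--     """Count tokens overlapping any named-entity span."""
--     if not entities:
--         return 0
--     spans: List[Tuple[int, int]] = []
--     for ent in entities:
--         start = ent.get("start")
--         end = ent.get("end")
--         if start is None or end is None:
--             continue
--         spans.append((int(start), int(end)))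
--
--     if not spans:
--         return 0
--
--     entity_tokens = 0
--     for _, tok_start, tok_end in tokens_with_spans:
--         for span_start, span_end in spans:
--             # Overlap check
--             if not (tok_end <= span_start or tok_start >= span_end):
--                 entity_tokens += 1
--                 break
--     return entity_tokens
-- ===== SOURCE B (Python) =====
-- from bisect import bisect_left
-- from typing import List, Sequence, Tuple
--
--
-- def count_entity_tokens(
--     tokens_with_spans: Sequence[Tuple[str, int, int]],
--     entities: Sequence[dict],
-- ) -> int:
--     """Count tokens overlapping any named-entity span.
--
--     Sort the spans by start once; a token (a, b) overlaps some span (s, e)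
--     iff among the spans with s < b (a prefix of the sorted order, found by
--     binary search) the maximum end exceeds a.
--     """
--     spans: List[Tuple[int, int]] = [
--         (int(ent["start"]), int(ent["end"]))
--         for ent in entities
--         if ent.get("start") is not None and ent.get("end") is not None
--     ]
--     if not spans:
--         return 0
--     spans.sort(key=lambda span: span[0])
--     starts = [s for s, _ in spans]
--     prefix_max: List[int] = []
--     running = spans[0][1]
--     for _, e in spans:
--         running = max(running, e)
--         prefix_max.append(running)
--     count = 0
--     for _, tok_start, tok_end in tokens_with_spans:
--         i = bisect_left(starts, tok_end)
--         if i and prefix_max[i - 1] > tok_start: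
--             count += 1
--     return count
-- ===== Notes on version B (the rewrite author's own statement) =====
-- stated objective: alternative
-- what changed: Instead of scanning the span list for every token, B sorts the spans by start once, precomputes prefix maxima of span ends, and answers each token's overlap query with one binary search (a token overlaps some span iff the maximum end among spans with start < tok_end exceeds tok_start); O((T+S) log S) vs A's O(T*S) worst case, though A's early break makes it comparable on benign inputs.
import Mathlib
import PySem

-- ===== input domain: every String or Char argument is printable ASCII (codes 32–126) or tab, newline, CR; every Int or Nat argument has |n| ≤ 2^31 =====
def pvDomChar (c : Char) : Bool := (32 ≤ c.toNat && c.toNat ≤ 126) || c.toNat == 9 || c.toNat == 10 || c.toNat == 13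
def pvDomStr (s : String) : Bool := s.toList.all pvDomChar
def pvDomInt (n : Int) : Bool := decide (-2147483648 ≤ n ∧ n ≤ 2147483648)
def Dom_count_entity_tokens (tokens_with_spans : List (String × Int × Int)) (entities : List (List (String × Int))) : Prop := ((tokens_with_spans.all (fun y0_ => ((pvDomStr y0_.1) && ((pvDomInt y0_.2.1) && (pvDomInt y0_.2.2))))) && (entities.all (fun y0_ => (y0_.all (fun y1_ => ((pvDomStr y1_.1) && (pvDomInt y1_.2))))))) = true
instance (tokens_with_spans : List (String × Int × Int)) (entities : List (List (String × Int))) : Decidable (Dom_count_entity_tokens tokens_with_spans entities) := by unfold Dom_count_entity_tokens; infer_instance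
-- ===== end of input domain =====

-- B replaces A's per-token scan of all spans by one sort-by-start plus a
-- binary search per token against prefix maxima of span ends (objective: alternative).

-- ===== PORT A =====

-- the span-collecting loop of A ("for ent in entities: … spans.append(…)")
def pvSpansA (entities : List (List (String × Int))) : List (Int × Int) :=
  entities.foldl (fun spans ent =>
    match PySem.Dict.get? ⟨ent⟩ "start", PySem.Dict.get? ⟨ent⟩ "end" with
    | some s, some e => spans ++ [(s, e)]
    | _, _ => spans) []

-- A's inner "for span in spans: if overlap: entity_tokens += 1; break"
def pvTokenHit (spans : List (Int × Int)) (tok_start tok_end : Int) : Int :=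
  match spans with
  | [] => 0
  | (span_start, span_end) :: rest =>
    if ¬(tok_end ≤ span_start ∨ tok_start ≥ span_end) then 1
    else pvTokenHit rest tok_start tok_end

def count_entity_tokens (tokens_with_spans : List (String × Int × Int)) (entities : List (List (String × Int))) : Int :=
  if entities = [] then 0
  else
    let spans := pvSpansA entities
    if spans = [] then 0
    else tokens_with_spans.foldl (fun acc t => acc + pvTokenHit spans t.2.1 t.2.2) 0

-- ===== PORT B =====

-- B's span list comprehension
def pvSpansB (entities : List (List (String × Int))) : List (Int × Int) :=
  entities.filterMap (fun ent =>
    match PySem.Dict.get? ⟨ent⟩ "start", PySem.Dict.get? ⟨ent⟩ "end" with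
    | some s, some e => some (s, e)
    | _, _ => none)

-- B's running-maximum loop over the span ends
def pvPrefixMax (running : Int) : List Int → List Int
  | [] => []
  | e :: rest => (max running e) :: pvPrefixMax (max running e) rest

def count_entity_tokens_alt (tokens_with_spans : List (String × Int × Int)) (entities : List (List (String × Int))) : Int :=
  match PySem.List.sorted (pvSpansB entities) Prod.fst with
  | [] => 0
  | (s0, e0) :: tl =>
    let spans := (s0, e0) :: tl
    let starts := spans.map Prod.fst
    let prefixMax := pvPrefixMax e0 (spans.map Prod.snd)
    tokens_with_spans.foldl (fun count t =>
      let i := PySem.List.bisectLeft starts t.2.2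
      if i ≠ 0 ∧ t.2.1 < PySem.List.pyGetD prefixMax ((i : Int) - 1) 0 then count + 1
      else count) 0

-- ===== PRECONDITION & SPEC =====
def Spec_count_entity_tokens (tokens_with_spans : List (String × Int × Int)) (entities : List (List (String × Int))) (out : Int) : Prop := out = count_entity_tokens_alt tokens_with_spans entities
instance (tokens_with_spans : List (String × Int × Int)) (entities : List (List (String × Int))) (out : Int) : Decidable (Spec_count_entity_tokens tokens_with_spans entities out) := by unfold Spec_count_entity_tokens; infer_instance

-- ===== CLAIM (what is proved, stated in full; the proofs are below) =====
def Claim_equal_count_entity_tokens : Prop := ∀ (tokens_with_spans : List (String × Int × Int)) (entities : List (List (String × Int))), Dom_count_entity_tokens tokens_with_spans entities → Spec_count_entity_tokens tokens_with_spans entities (count_entity_tokens tokens_with_spans entities)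

-- ===== LEMMAS AND PROOFS =====

-- A's two ways of collecting the spans build the same list
theorem pvSpansA_aux (entities : List (List (String × Int))) (acc : List (Int × Int)) :
    entities.foldl (fun spans ent =>
      match PySem.Dict.get? ⟨ent⟩ "start", PySem.Dict.get? ⟨ent⟩ "end" with
      | some s, some e => spans ++ [(s, e)]
      | _, _ => spans) acc
    = acc ++ entities.filterMap (fun ent =>
        match PySem.Dict.get? ⟨ent⟩ "start", PySem.Dict.get? ⟨ent⟩ "end" with
        | some s, some e => some (s, e)
        | _, _ => none) := by
  induction entities generalizing acc with
  | nil => simp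
  | cons ent rest ih =>
    simp only [List.foldl_cons, List.filterMap_cons]
    cases hs : PySem.Dict.get? (⟨ent⟩ : PySem.Dict String Int) "start" with
    | none => simpa using ih acc
    | some s =>
      cases he : PySem.Dict.get? (⟨ent⟩ : PySem.Dict String Int) "end" with
      | none => simpa using ih acc
      | some e => simp [ih]

theorem pvSpansA_eq_spansB (entities : List (List (String × Int))) :
    pvSpansA entities = pvSpansB entities := by
  simpa using pvSpansA_aux entities []

-- A's inner loop returns 1 iff some span overlaps the token
theorem pvTokenHit_eq (spans : List (Int × Int)) (a b : Int) :
    pvTokenHit spans a b = if ∃ p ∈ spans, p.1 < b ∧ a < p.2 then 1 else 0 := by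
  induction spans with
  | nil => simp [pvTokenHit]
  | cons p rest ih =>
    obtain ⟨s, e⟩ := p
    by_cases h : s < b ∧ a < e
    · simp [pvTokenHit, h]
    · have hcond : ¬¬(b ≤ s ∨ a ≥ e) := by omega
      simp only [pvTokenHit, if_neg hcond, ih]
      by_cases hex : ∃ p ∈ rest, p.1 < b ∧ a < p.2
      · rw [if_pos hex, if_pos (by exact ⟨_, List.mem_cons_of_mem _ hex.choose_spec.1, hex.choose_spec.2⟩)]
      · rw [if_neg hex, if_neg (by
          rintro ⟨q, hq, hqo⟩
          rcases List.mem_cons.mp hq with rfl | hq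
          · exact h hqo
          · exact hex ⟨q, hq, hqo⟩)]

theorem pvPrefixMax_length (r : Int) (xs : List Int) :
    (pvPrefixMax r xs).length = xs.length := by
  induction xs generalizing r with
  | nil => rfl
  | cons x rest ih => simp [pvPrefixMax, ih]

theorem pvPrefixMax_getElem (r : Int) (xs : List Int) (k : Nat) (h : k < xs.length) :
    (pvPrefixMax r xs)[k]'(by rw [pvPrefixMax_length]; exact h)
      = (xs.take (k + 1)).foldl max r := by
  induction xs generalizing r k with
  | nil => simp at h
  | cons x rest ih =>
    cases k with
    | zero => simp [pvPrefixMax]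
    | succ k =>
      simp only [pvPrefixMax, List.getElem_cons_succ, List.take_succ_cons, List.foldl_cons]
      exact ih (max r x) k (by simpa using h)

theorem lt_foldl_max_iff (a r : Int) (l : List Int) :
    a < l.foldl max r ↔ a < r ∨ ∃ x ∈ l, a < x := by
  induction l generalizing r with
  | nil => simp
  | cons x rest ih =>
    simp only [List.foldl_cons, ih, lt_max_iff, List.mem_cons]
    constructor
    · rintro (( h | h) | ⟨y, hy, hay⟩)
      · exact Or.inl h
      · exact Or.inr ⟨x, Or.inl rfl, h⟩
      · exact Or.inr ⟨y, Or.inr hy, hay⟩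
    · rintro (h | ⟨y, (rfl | hy), hay⟩)
      · exact Or.inl (Or.inl h)
      · exact Or.inl (Or.inr hay)
      · exact Or.inr ⟨y, hy, hay⟩

-- B's per-token test is exactly "some span overlaps the token"
theorem pvBTest_iff (spans0 : List (Int × Int)) (s0 e0 : Int) (tl : List (Int × Int))
    (hs : PySem.List.sorted spans0 Prod.fst = (s0, e0) :: tl) (a b : Int) :
    (PySem.List.bisectLeft (((s0, e0) :: tl).map Prod.fst) b ≠ 0 ∧
      a < PySem.List.pyGetD (pvPrefixMax e0 (((s0, e0) :: tl).map Prod.snd))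
            ((PySem.List.bisectLeft (((s0, e0) :: tl).map Prod.fst) b : Int) - 1) 0)
    ↔ ∃ p ∈ spans0, p.1 < b ∧ a < p.2 := by
  set ss : List (Int × Int) := (s0, e0) :: tl with hss
  set starts := ss.map Prod.fst with hstarts
  set ends := ss.map Prod.snd with hends
  set i := PySem.List.bisectLeft starts b with hi
  have hperm : ss.Perm spans0 := hs ▸ PySem.List.sorted_perm spans0 Prod.fst false
  have hpair : starts.Pairwise (· ≤ ·) := by
    rw [hstarts]
    exact (List.pairwise_map).mpr (hs ▸ PySem.List.sorted_pairwise spans0 Prod.fst)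
  obtain ⟨hile, hlt, hge⟩ := PySem.List.bisectLeft_spec starts b hpair
  have hlen : starts.length = ss.length := List.length_map ..
  have hlene : ends.length = ss.length := List.length_map ..
  -- replace membership in spans0 by membership in ss
  rw [show (∃ p ∈ spans0, p.1 < b ∧ a < p.2) ↔ ∃ p ∈ ss, p.1 < b ∧ a < p.2 from by
    constructor
    · rintro ⟨p, hp, h⟩; exact ⟨p, hperm.mem_iff.mpr hp, h⟩
    · rintro ⟨p, hp, h⟩; exact ⟨p, hperm.mem_iff.mp hp, h⟩]
  have hgetstarts : ∀ (j : Nat) (h : j < ss.length), starts[j]'(by omega) = (ss[j]).1 := by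
    intro j h; simp [hstarts]
  have hgetends : ∀ (j : Nat) (h : j < ss.length), ends[j]'(by omega) = (ss[j]).2 := by
    intro j h; simp [hends]
  -- the right-hand side as an indexed statement cut at i
  have hrhs : (∃ p ∈ ss, p.1 < b ∧ a < p.2) ↔ ∃ j, ∃ h : j < ss.length, j < i ∧ a < ends[j]'(by omega) := by
    constructor
    · rintro ⟨p, hp, h1, h2⟩
      obtain ⟨j, hj, rfl⟩ := List.mem_iff_getElem.mp hp
      refine ⟨j, hj, ?_, by rw [hgetends j hj]; exact h2⟩
      by_contra hnot
      have := hge j (by omega) (by omega)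
      rw [hgetstarts j hj] at this
      omega
    · rintro ⟨j, hj, hji, h⟩
      refine ⟨ss[j], List.getElem_mem hj, ?_, by rw [hgetends j hj] at h; exact h⟩
      have := hlt j (by omega) hji
      rw [hgetstarts j hj] at this
      exact this
  rw [hrhs]
  by_cases hiz : i = 0
  · simp only [hiz]
    constructor
    · rintro ⟨h, _⟩; omega
    · rintro ⟨j, hj, hji, _⟩; omega
  · -- i ≥ 1 : the guard reduces to the prefix maximum test
    have hi1 : 1 ≤ i := Nat.one_le_iff_ne_zero.mpr hiz
    have hile' : i ≤ ss.length := by omega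
    have hpm : PySem.List.pyGetD (pvPrefixMax e0 ends) ((i : Int) - 1) 0
        = (ends.take i).foldl max e0 := by
      rw [PySem.List.pyGetD_eq_getElem _ _ (by omega)
        (by rw [pvPrefixMax_length]; omega)]
      have htn : ((i : Int) - 1).toNat = i - 1 := by omega
      rw [show ((pvPrefixMax e0 ends)[((i : Int) - 1).toNat]'_) =
          ((pvPrefixMax e0 ends)[i - 1]'(by rw [pvPrefixMax_length]; omega)) from by
        congr 1]
      rw [pvPrefixMax_getElem e0 ends (i - 1) (by omega)]
      rw [show i - 1 + 1 = i from by omega]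
    rw [hpm]
    have htake : ends.take i = e0 :: (tl.map Prod.snd).take (i - 1) := by
      have hgen : ∀ n : Nat, 1 ≤ n →
          (List.map Prod.snd ((s0, e0) :: tl)).take n = e0 :: (tl.map Prod.snd).take (n - 1) := by
        intro n hn
        obtain ⟨k, rfl⟩ : ∃ k, n = k + 1 := ⟨n - 1, by omega⟩
        simp
      rw [hends, hss]
      exact hgen i hi1
    have hfold : (ends.take i).foldl max e0 = ((tl.map Prod.snd).take (i - 1)).foldl max e0 := by
      rw [htake]; simp
    constructor
    · rintro ⟨-, hlt'⟩
      rw [hfold] at hlt'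
      rcases (lt_foldl_max_iff a e0 _).mp hlt' with h | ⟨x, hx, hax⟩
      · exact ⟨0, by simp [hss], by omega, by simpa [hends, hss] using h⟩
      · rw [List.mem_take_iff_getElem] at hx
        obtain ⟨j, hj, rfl⟩ := hx
        have hjt : j < tl.length := by simpa using lt_of_lt_of_le hj (min_le_right _ _)
        have hji' : j < i - 1 := lt_of_lt_of_le hj (min_le_left _ _)
        refine ⟨j + 1, by simp [hss]; omega, by omega, ?_⟩
        simpa [hends, hss] using hax
    · rintro ⟨j, hj, hji, hax⟩
      refine ⟨hiz, ?_⟩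
      rw [hfold]
      apply (lt_foldl_max_iff a e0 _).mpr
      cases j with
      | zero => exact Or.inl (by simpa [hends, hss] using hax)
      | succ j =>
        have hjt : j < tl.length := by
          have := hj; simp [hss] at this; omega
        refine Or.inr ⟨ends[j + 1]'(by omega), ?_, hax⟩
        rw [List.mem_take_iff_getElem]
        have hval : ends[j + 1]'(by omega) = (tl.map Prod.snd)[j]'(by simpa using hjt) := by
          simp [hends, hss]
        exact ⟨j, by simp; omega, hval.symm⟩

-- ===== VERDICT (by name: the statement is the Claim_ definition above) =====
theorem count_entity_tokens_spec : Claim_equal_count_entity_tokens := by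
  intro toks ents _
  unfold Spec_count_entity_tokens
  by_cases hne : ents = []
  · subst hne
    simp [count_entity_tokens, count_entity_tokens_alt, pvSpansB, PySem.List.sorted]
  · by_cases hsp : pvSpansB ents = []
    · have hA : pvSpansA ents = [] := by rw [pvSpansA_eq_spansB]; exact hsp
      have hsort : PySem.List.sorted (pvSpansB ents) Prod.fst = [] := by
        rw [hsp]; rfl
      simp [count_entity_tokens, count_entity_tokens_alt, hne, hA, hsort]
    · rcases hl : PySem.List.sorted (pvSpansB ents) Prod.fst with _ | ⟨⟨s0, e0⟩, tl⟩
      · exact absurd ((PySem.List.sorted_eq_nil_iff _ _ _).mp hl) hsp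
      · have hAsp : pvSpansA ents ≠ [] := by
          rw [pvSpansA_eq_spansB]; exact hsp
        simp only [count_entity_tokens, count_entity_tokens_alt, hl, if_neg hne, if_neg hAsp]
        apply List.foldl_ext
        intro acc t _
        rw [pvTokenHit_eq, pvSpansA_eq_spansB]
        by_cases hE : ∃ p ∈ pvSpansB ents, p.1 < t.2.2 ∧ t.2.1 < p.2
        · rw [if_pos hE, if_pos ((pvBTest_iff (pvSpansB ents) s0 e0 tl hl t.2.1 t.2.2).mpr hE)]
        · rw [if_neg hE,
            if_neg (fun h => hE ((pvBTest_iff (pvSpansB ents) s0 e0 tl hl t.2.1 t.2.2).mp h))]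
          omega
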